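-- pv_equiv track=rewrite | github.com/OrosiTororo/Zero-Employee-Orchestrator | apps/api/app/orchestration/interview.py | _compute_keyword_relevance
-- ===== SOURCE A (Python) =====
-- def _compute_keyword_relevance(query: str, targets: list[str]) -> int:
--     """Calculate keyword overlap score between query and target texts."""
--     query_words = set(query.split())
--     # Exclude words that are too short (particles, etc.)
--     query_words = {w for w in query_words if len(w) >= 2}
--     score = 0
--     for target in targets:
--         target_words = set(target.split())
--         overlap = query_words & target_words
--         score += len(overlap)
--     return score
-- ===== SOURCE B (Python) =====
-- def _compute_keyword_relevance(query: str, targets: list[str]) -> int: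
--     """Calculate keyword overlap score between query and target texts."""
--     # Build an index: word -> number of targets whose word-set contains it.
--     index = {}
--     for target in targets:
--         for w in set(target.split()):
--             index[w] = index.get(w, 0) + 1
--     return sum(index.get(w, 0) for w in set(query.split()) if len(w) >= 2)
-- ===== Notes on version B (the rewrite author's own statement) =====
-- stated objective: alternative
-- what changed: Instead of intersecting the query word-set with each target's word-set, B builds a word->target-count index in one pass over the targets and then sums the counts of the (len>=2) query words.
import Mathlib
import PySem

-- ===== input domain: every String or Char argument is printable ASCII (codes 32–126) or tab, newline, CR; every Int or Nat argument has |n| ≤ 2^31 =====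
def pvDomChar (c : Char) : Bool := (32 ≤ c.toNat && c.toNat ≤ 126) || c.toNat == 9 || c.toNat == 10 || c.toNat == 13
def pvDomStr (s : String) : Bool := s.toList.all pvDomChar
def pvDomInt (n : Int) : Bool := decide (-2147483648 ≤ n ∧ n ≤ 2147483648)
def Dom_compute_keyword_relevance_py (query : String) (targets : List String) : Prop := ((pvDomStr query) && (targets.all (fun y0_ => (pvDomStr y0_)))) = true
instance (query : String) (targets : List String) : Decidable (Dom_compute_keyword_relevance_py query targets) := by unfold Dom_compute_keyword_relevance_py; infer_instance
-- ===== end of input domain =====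

-- B replaces the per-target set intersection with a word -> target-count index built once,
-- then a single sum over the (len >= 2) query words; proved equal to A on all inputs.

-- ===== PORT A =====
def compute_keyword_relevance_py (query : String) (targets : List String) : Int :=
  let query_words : PySem.Set String := PySem.Set.ofList (PySem.Str.split₀ query)
  let query_words : PySem.Set String := query_words.filter (fun w => decide ((2 : Int) ≤ PySem.Str.len w))
  targets.foldl (fun score target =>
    let target_words : PySem.Set String := PySem.Set.ofList (PySem.Str.split₀ target)
    let overlap := PySem.Set.inter query_words target_words
    score + PySem.Set.len overlap) 0

-- ===== PORT B =====
def compute_keyword_relevance_py_alt (query : String) (targets : List String) : Int :=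
  let index : PySem.Dict String Int :=
    targets.foldl (fun d target =>
      (PySem.Set.ofList (PySem.Str.split₀ target)).foldl
        (fun d w => d.modify w 0 (· + 1)) d) (PySem.Dict.empty : PySem.Dict String Int)
  ((PySem.Set.ofList (PySem.Str.split₀ query)).filter (fun w => decide ((2 : Int) ≤ PySem.Str.len w))).foldl
    (fun s w => s + index.getD w 0) 0

-- ===== PRECONDITION & SPEC =====
def Spec_compute_keyword_relevance_py (query : String) (targets : List String) (out : Int) : Prop := out = compute_keyword_relevance_py_alt query targets
instance (query : String) (targets : List String) (out : Int) : Decidable (Spec_compute_keyword_relevance_py query targets out) := by unfold Spec_compute_keyword_relevance_py; infer_instance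

-- ===== CLAIM (what is proved, stated in full; the proofs are below) =====
def Claim_equal_compute_keyword_relevance_py : Prop := ∀ (query : String) (targets : List String), Dom_compute_keyword_relevance_py query targets → Spec_compute_keyword_relevance_py query targets (compute_keyword_relevance_py query targets)

-- ===== LEMMAS AND PROOFS =====

-- length of a filter as a sum of 0/1 indicators
theorem pv_len_filter_eq_sum (Q : List String) (p : String → Bool) :
    ((Q.filter p).length : Int) = (Q.map (fun w => if p w then (1 : Int) else 0)).sum := by
  induction Q with
  | nil => simp
  | cons x xs ih =>
    by_cases h : p x = true <;> simp [h, ih, add_comm]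

-- pointwise sum distributes over map
theorem pv_sum_map_add (Q : List String) (f g : String → Int) :
    (Q.map (fun w => f w + g w)).sum = (Q.map f).sum + (Q.map g).sum := by
  induction Q with
  | nil => simp
  | cons x xs ih => simp [ih]; ring

-- exchange the two summations
theorem pv_sum_comm (ts : List String) (Q : List String) (f : String → String → Int) :
    (ts.map (fun t => (Q.map (fun w => f w t)).sum)).sum
      = (Q.map (fun w => (ts.map (fun t => f w t)).sum)).sum := by
  induction ts with
  | nil => simp
  | cons t ts ih =>
    simp only [List.map_cons, List.sum_cons, ih]
    rw [← pv_sum_map_add]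

-- the index's value at w counts the targets whose word-set contains w
theorem pv_index_getD (targets : List String) (d : PySem.Dict String Int) (w : String) :
    (targets.foldl (fun d target =>
        (PySem.Set.ofList (PySem.Str.split₀ target)).foldl
          (fun d w => d.modify w 0 (· + 1)) d) d).getD w 0
      = d.getD w 0
        + (targets.map (fun t =>
            if (PySem.Set.ofList (PySem.Str.split₀ t)).contains w then (1 : Int) else 0)).sum := by
  induction targets generalizing d with
  | nil => simp
  | cons t ts ih =>
    simp only [List.foldl_cons, List.map_cons, List.sum_cons, ih,
      PySem.Dict.getD_foldl_modify_add_one]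
    have hnd := PySem.Set.nodup_ofList (PySem.Str.split₀ t)
    by_cases h : w ∈ PySem.Set.ofList (PySem.Str.split₀ t)
    · rw [List.count_eq_one_of_mem hnd h]
      have hm : w ∈ PySem.Str.split₀ t := by simpa using h
      simp [hm]
      ring
    · have hm : w ∉ PySem.Str.split₀ t := by simpa using h
      rw [List.count_eq_zero_of_not_mem h]
      simp [hm]

-- ===== VERDICT (by name: the statement is the Claim_ definition above) =====
theorem compute_keyword_relevance_py_spec : Claim_equal_compute_keyword_relevance_py := by
  intro query targets _
  unfold Spec_compute_keyword_relevance_py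
  unfold compute_keyword_relevance_py compute_keyword_relevance_py_alt
  simp only [PySem.Set.inter, PySem.Set.len, PySem.List.foldl_add, zero_add]
  simp only [pv_len_filter_eq_sum, pv_index_getD]
  rw [pv_sum_comm]
  simp [PySem.Dict.getD]
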